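-- pv_equiv track=rewrite | github.com/miliar/Code_Jam_Webscraper | solutions_python/solutions_year15_round0_nr1/1084.py | solve
-- ===== SOURCE A (Python) =====
-- def solve(casedata):
--     """ Solve case """
--     C = casedata
--     result = 0
--     totalup = 0
--     for s, nb in enumerate(C):
--         if totalup <= s:
--             result += s-totalup
--             totalup = s
--         totalup += nb
--
--     return str(result)
-- ===== SOURCE B (Python) =====
-- def solve(casedata):
--     """ Solve case """
--     prefix = [0]
--     for nb in casedata:
--         prefix.append(prefix[-1] + nb)
--     return str(max([0] + [s - prefix[s] for s in range(len(casedata))]))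
-- ===== Notes on version B (the rewrite author's own statement) =====
-- stated objective: alternative
-- what changed: Replaced A's fused loop that carries a running total and bumps it (accumulating the deficit) by a two-phase computation: build an explicit prefix-sum table, then take the max of 0 and of s - prefix[s] over all indices.
import Mathlib
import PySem

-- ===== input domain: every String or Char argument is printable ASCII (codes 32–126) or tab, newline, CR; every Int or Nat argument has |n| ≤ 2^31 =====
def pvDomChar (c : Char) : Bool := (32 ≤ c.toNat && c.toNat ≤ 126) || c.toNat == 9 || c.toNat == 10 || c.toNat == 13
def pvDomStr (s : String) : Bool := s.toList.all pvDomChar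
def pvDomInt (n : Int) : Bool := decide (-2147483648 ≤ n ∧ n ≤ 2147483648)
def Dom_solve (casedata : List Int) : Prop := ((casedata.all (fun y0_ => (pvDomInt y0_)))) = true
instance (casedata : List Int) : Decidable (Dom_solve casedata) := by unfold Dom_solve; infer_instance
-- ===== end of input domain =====

-- B replaces A's fused running-total-with-bump loop by an explicit prefix-sum table
-- followed by a max over the differences s - prefix[s] (objective: alternative decomposition).

-- ===== PORT A =====
-- for s, nb in enumerate(C): if totalup <= s: result += s-totalup; totalup = s; totalup += nb
def solve (casedata : List Int) : String :=
  let st := (PySem.List.enumerate casedata).foldl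
    (fun (st : Int × Int) (p : Int × Int) =>
      let result := st.1
      let totalup := st.2
      let s := p.1
      let nb := p.2
      if totalup ≤ s then (result + (s - totalup), s + nb)
      else (result, totalup + nb))
    (0, 0)
  PySem.Int.toStr st.1

-- ===== PORT B =====
-- prefix = [0]; for nb in C: prefix.append(prefix[-1] + nb)
-- return str(max([0] + [s - prefix[s] for s in range(len(C))]))
def solve_alt (casedata : List Int) : String :=
  let pfx := casedata.foldl (fun acc nb => acc ++ [PySem.List.pyGetD acc (-1) 0 + nb]) [(0 : Int)]
  -- prefix[s]: s < len(prefix) always, so plain in-range indexing (getD is exact here)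
  let diffs := (List.range casedata.length).map (fun (s : Nat) => (s : Int) - pfx.getD s 0)
  PySem.Int.toStr (diffs.foldl max 0)

-- ===== PRECONDITION & SPEC =====
def Spec_solve (casedata : List Int) (out : String) : Prop := out = solve_alt casedata
instance (casedata : List Int) (out : String) : Decidable (Spec_solve casedata out) := by unfold Spec_solve; infer_instance

-- ===== CLAIM (what is proved, stated in full; the proofs are below) =====
def Claim_equal_solve : Prop := ∀ (casedata : List Int), Dom_solve casedata → Spec_solve casedata (solve casedata)

-- ===== LEMMAS AND PROOFS =====

-- A's loop, from state (r, r + d) over indices starting at s0, computes a running max of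
-- (index) - (d + prefix sum of the remaining elements).
lemma loopA (l : List Int) : ∀ (s0 : Int) (r d : Int),
    ((PySem.List.enumerate l s0).foldl
      (fun (st : Int × Int) (p : Int × Int) =>
        let result := st.1
        let totalup := st.2
        let s := p.1
        let nb := p.2
        if totalup ≤ s then (result + (s - totalup), s + nb)
        else (result, totalup + nb))
      (r, r + d)).1
    = (List.range l.length).foldl
        (fun acc (i : Nat) => max acc (s0 + (i : Int) - (d + (l.take i).sum))) r := by
  induction l with
  | nil => intro s0 r d; simp [PySem.List.enumerate]
  | cons x xs ih =>
    intro s0 r d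
    rw [PySem.List.enumerate_cons]
    have hstate :
        (if r + d ≤ s0 then (r + (s0 - (r + d)), s0 + x) else (r, r + d + x))
          = (max r (s0 - d), max r (s0 - d) + (d + x)) := by
      split_ifs with h <;> simp only [Prod.mk.injEq] <;> constructor <;> omega
    simp only [List.foldl_cons]
    rw [hstate, ih (s0 + 1) (max r (s0 - d)) (d + x)]
    rw [List.length_cons, List.range_succ_eq_map, List.foldl_cons, List.foldl_map]
    have h0 : max r (s0 + ((0 : Nat) : Int) - (d + ((x :: xs).take 0).sum)) = max r (s0 - d) := by
      norm_num
    rw [h0]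
    apply PySem.List.foldl_congr_mem
    intro acc i _
    simp only [Nat.succ_eq_add_one, List.take_succ_cons, List.sum_cons]
    congr 1
    push_cast
    ring

-- B's prefix loop is scanl.
lemma pfx_scanl : ∀ (l : List Int) (acc : List Int) (a : Int),
    l.foldl (fun acc nb => acc ++ [PySem.List.pyGetD acc (-1) 0 + nb]) (acc ++ [a])
      = acc ++ List.scanl (· + ·) a l := by
  intro l
  induction l with
  | nil => intro acc a; simp [List.scanl_nil]
  | cons x xs ih =>
    intro acc a
    simp only [List.foldl_cons, PySem.List.pyGetD_neg_one_append_singleton]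
    rw [ih (acc ++ [a]) (a + x)]
    simp [List.scanl_cons, List.append_assoc]

lemma getD_scanl : ∀ (l : List Int) (s : Nat) (a : Int), s ≤ l.length →
    (List.scanl (· + ·) a l).getD s 0 = a + (l.take s).sum := by
  intro l
  induction l with
  | nil =>
    intro s a h
    simp only [List.length_nil, Nat.le_zero] at h
    subst h
    simp [List.scanl_nil]
  | cons x xs ih =>
    intro s a h
    cases s with
    | zero => simp [List.scanl_cons]
    | succ s =>
      simp only [List.scanl_cons, List.getD_cons_succ, List.take_succ_cons, List.sum_cons]
      rw [ih s (a + x) (by simpa using h)]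
      ring

-- ===== VERDICT (by name: the statement is the Claim_ definition above) =====
theorem solve_spec : Claim_equal_solve := by
  intro casedata _
  unfold Spec_solve solve solve_alt
  have hA := loopA casedata 0 0 0
  simp only [show ((0 : Int), (0 : Int)) = ((0 : Int), (0 : Int) + 0) by norm_num] at *
  rw [hA]
  have hpfx := pfx_scanl casedata [] 0
  simp only [List.nil_append] at hpfx
  rw [hpfx, List.foldl_map]
  congr 1
  apply PySem.List.foldl_congr_mem
  intro acc s hs
  rw [getD_scanl casedata s 0 (by simpa [List.mem_range] using Nat.le_of_lt (List.mem_range.mp hs))]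
  congr 1
  ring
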